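-- pv_equiv track=rewrite | github.com/obn11/COSC | COSC262/Lab2 Alg.py | my_enumerate
-- ===== SOURCE A (Python) =====
-- def my_enumerate(items, index=0, tuples=0):
--     """'"""
--     if tuples == 0:
--         tuples = []
--     if index == len(items):
--         return tuples
--     else:
--         tup = (index, items[index])
--         index += 1
--         tuples.append(tup)
--         return my_enumerate(items, index, tuples)
-- ===== SOURCE B (Python) =====
-- def my_enumerate(items, index=0, tuples=0):
--     """'"""
--     if tuples == 0:
--         tuples = []
--     for i in range(index, len(items)):
--         tuples.append((i, items[i]))
--     return tuples
-- ===== Notes on version B (the rewrite author's own statement) =====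
-- stated objective: simpler
-- what changed: Replaces the tail recursion (one call frame per element, re-checking the sentinel each call) with a single flat for-loop over range(index, len(items)) appending to the accumulator.
-- outside the precondition, e.g. on my_enumerate([], 0, 5): A returns 5, B returns 5
import Mathlib
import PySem

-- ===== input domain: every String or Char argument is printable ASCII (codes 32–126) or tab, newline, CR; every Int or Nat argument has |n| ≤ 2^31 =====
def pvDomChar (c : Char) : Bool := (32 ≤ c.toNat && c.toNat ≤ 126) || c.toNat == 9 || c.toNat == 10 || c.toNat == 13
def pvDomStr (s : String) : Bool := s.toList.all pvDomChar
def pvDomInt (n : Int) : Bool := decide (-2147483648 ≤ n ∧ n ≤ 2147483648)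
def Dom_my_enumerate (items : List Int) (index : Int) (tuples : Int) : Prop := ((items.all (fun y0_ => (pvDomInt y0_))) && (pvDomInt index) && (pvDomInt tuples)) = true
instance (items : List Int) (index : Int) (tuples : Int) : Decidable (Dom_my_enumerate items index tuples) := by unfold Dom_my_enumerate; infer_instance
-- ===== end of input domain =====

-- B replaces A's tail recursion by a flat loop over range(index, len(items)); same return value on Pre_.
-- Both Python versions mutate a caller-supplied list only when one is passed (excluded by Pre_); the proof is about the return value.


-- ===== PORT A =====
-- A's recursion: if index == len(items) return acc, else append (index, items[index]) and recurse with index+1.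
-- (The integer parameter `tuples` can only be the 0 sentinel inside Pre_, so the accumulator starts at [].)
-- items[index] raising IndexError (pyGet? = none) lies outside Pre_; the port returns the accumulator there.
def my_enumerate_go (items : List Int) (index : Int) (acc : List (Int × Int)) : List (Int × Int) :=
  if index = (items.length : Int) then acc
  else
    match h : PySem.List.pyGet? items index with  -- named for the termination proof
    | none => acc
    | some v => my_enumerate_go items (index + 1) (acc ++ [(index, v)])
termination_by ((items.length : Int) - index).toNat
decreasing_by
  have := PySem.List.pyGet?_eq_none_iff (xs := items) (i := index)
  have hin : PySem.Raise.InRange items.length index := by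
    by_contra hc
    exact (by simp [this.mpr hc] at h)
  unfold PySem.Raise.InRange at hin
  omega

def my_enumerate (items : List Int) (index : Int) (tuples : Int) : List (Int × Int) :=
  my_enumerate_go items index []

-- ===== PORT B =====
-- B's loop: for i in range(index, len(items)): tuples.append((i, items[i])).
def my_enumerate_alt (items : List Int) (index : Int) (tuples : Int) : List (Int × Int) :=
  (PySem.List.pyRange index (items.length : Int) 1).foldl
    (fun acc i =>
      match PySem.List.pyGet? items i with
      | none => acc
      | some v => acc ++ [(i, v)])
    []

-- ===== PRECONDITION & SPEC =====
-- Pre_ excludes tuples ≠ 0 (then A either raises AttributeError calling .append on an int, or — when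
-- index == len(items) — returns that int itself, which is not a list of pairs), and indices outside
-- [-len(items), len(items)] (then A raises IndexError at items[index]).
def Pre_my_enumerate (items : List Int) (index : Int) (tuples : Int) : Prop :=
  tuples = 0 ∧ -(items.length : Int) ≤ index ∧ index ≤ (items.length : Int)
instance (items : List Int) (index : Int) (tuples : Int) : Decidable (Pre_my_enumerate items index tuples) := by unfold Pre_my_enumerate; infer_instance

def pvWitness_my_enumerate : List Int × Int × Int := ([4, 7, 9], 1, 0)

def Spec_my_enumerate (items : List Int) (index : Int) (tuples : Int) (out : List (Int × Int)) : Prop := out = my_enumerate_alt items index tuples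
instance (items : List Int) (index : Int) (tuples : Int) (out : List (Int × Int)) : Decidable (Spec_my_enumerate items index tuples out) := by unfold Spec_my_enumerate; infer_instance

-- ===== CLAIM (what is proved, stated in full; the proofs are below) =====
def Claim_equal_my_enumerate : Prop := ∀ (items : List Int) (index : Int) (tuples : Int), Dom_my_enumerate items index tuples → Pre_my_enumerate items index tuples → Spec_my_enumerate items index tuples (my_enumerate items index tuples)

-- ===== LEMMAS AND PROOFS =====

theorem my_enumerate_go_eq_foldl (items : List Int) (index : Int) (acc : List (Int × Int))
    (hge : -(items.length : Int) ≤ index) (hle : index ≤ (items.length : Int)) :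
    my_enumerate_go items index acc =
      (PySem.List.pyRange index (items.length : Int) 1).foldl
        (fun acc i =>
          match PySem.List.pyGet? items i with
          | none => acc
          | some v => acc ++ [(i, v)])
        acc := by
  by_cases h : index = (items.length : Int)
  · rw [my_enumerate_go, if_pos h, h, PySem.List.pyRange_one_eq_nil le_rfl]
    rfl
  · have hlt : index < (items.length : Int) := lt_of_le_of_ne hle h
    rw [my_enumerate_go, if_neg h, PySem.List.pyRange_one_cons hlt, List.foldl_cons]
    cases hg : PySem.List.pyGet? items index with
    | none =>
        have : ¬ PySem.Raise.InRange items.length index :=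
          (PySem.List.pyGet?_eq_none_iff (xs := items) (i := index)).mp hg
        unfold PySem.Raise.InRange at this
        omega
    | some v =>
        simp only
        exact my_enumerate_go_eq_foldl items (index + 1) (acc ++ [(index, v)]) (by omega) (by omega)
termination_by ((items.length : Int) - index).toNat
decreasing_by omega

-- ===== VERDICT (by name: the statement is the Claim_ definition above) =====
theorem my_enumerate_spec : Claim_equal_my_enumerate := by
  intro items index tuples _ hpre
  unfold Spec_my_enumerate my_enumerate my_enumerate_alt
  exact my_enumerate_go_eq_foldl items index [] hpre.2.1 hpre.2.2
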